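-- pv_equiv track=rewrite | github.com/callmewenhao/leetcode | contests/biweekly-contest-100/T2.py | maximizeGreatness2
-- ===== SOURCE A (Python) =====
-- from typing import List
--
-- def maximizeGreatness2(nums: List[int]) -> int:
--     n = len(nums)
--     nums.sort()
--     ans = 0
--     i, j = 0, 1
--     while j < n:
--         while j < n and nums[i] >= nums[j]:
--             j += 1
--         if j < n:
--             ans += 1
--         i += 1
--         j += 1
--     return ans
-- ===== SOURCE B (Python) =====
-- from typing import List
--
-- def maximizeGreatness2(nums: List[int]) -> int:
--     # closed form: answer = n - (maximum frequency of any value)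
--     nums.sort()  # keep A's in-place sort side effect
--     max_run = 0
--     run = 0
--     prev = None
--     for x in nums:
--         if prev is not None and x == prev:
--             run += 1
--         else:
--             run = 1
--         if run > max_run:
--             max_run = run
--         prev = x
--     return len(nums) - max_run
-- ===== Notes on version B (the rewrite author's own statement) =====
-- stated objective: alternative
-- what changed: Replaces the greedy two-pointer matching over the sorted array by the closed form answer = n - (maximum frequency of any value), computed in one run-length scan of the sorted array.
import Mathlib
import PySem

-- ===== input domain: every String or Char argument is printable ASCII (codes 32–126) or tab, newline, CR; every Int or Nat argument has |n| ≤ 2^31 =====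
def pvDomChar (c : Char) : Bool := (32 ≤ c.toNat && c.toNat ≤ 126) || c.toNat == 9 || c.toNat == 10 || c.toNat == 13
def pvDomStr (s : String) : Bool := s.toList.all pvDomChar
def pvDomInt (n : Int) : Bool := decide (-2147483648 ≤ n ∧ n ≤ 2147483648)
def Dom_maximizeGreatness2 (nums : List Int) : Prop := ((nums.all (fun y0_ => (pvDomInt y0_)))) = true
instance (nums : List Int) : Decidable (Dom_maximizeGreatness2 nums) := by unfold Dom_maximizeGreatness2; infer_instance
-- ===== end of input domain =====

-- B replaces A's greedy two-pointer matching by the closed form n - (max value frequency) from one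
-- run-length scan of the sorted list; both Pythons sort nums in place (same side effect), the
-- theorems are about the return value.

-- ===== PORT A =====
-- inner 'while j < n and nums[i] >= nums[j]: j += 1'
def pvInnerA (s : List Int) (i j : Int) : Int :=
  if _h : j < (s.length : Int) ∧ PySem.List.pyGetD s j 0 ≤ PySem.List.pyGetD s i 0 then
    pvInnerA s i (j + 1)
  else j
termination_by ((s.length : Int) - j).toNat
decreasing_by omega

-- the inner loop only moves j forward (needed for the outer loop's termination)
theorem pvInnerA_ge (s : List Int) (i j : Int) : j ≤ pvInnerA s i j := by
  rw [pvInnerA]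
  split
  · exact le_trans (by omega) (pvInnerA_ge s i (j + 1))
  · exact le_refl j
termination_by ((s.length : Int) - j).toNat
decreasing_by omega

-- outer 'while j < n: …'
def pvOuterA (s : List Int) (ans i j : Int) : Int :=
  if _h : j < (s.length : Int) then
    let j' := pvInnerA s i j
    pvOuterA s (if j' < (s.length : Int) then ans + 1 else ans) (i + 1) (j' + 1)
  else ans
termination_by ((s.length : Int) - j).toNat
decreasing_by have := pvInnerA_ge s i j; omega

def maximizeGreatness2 (nums : List Int) : Int :=
  let s := PySem.List.sorted nums (fun x => x) false
  pvOuterA s 0 0 1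

-- ===== PORT B =====
-- one step of B's run-length scan: state (prev, run, max_run)
def pvStepB (acc : Option Int × Int × Int) (x : Int) : Option Int × Int × Int :=
  let run' := if acc.1 = some x then acc.2.1 + 1 else 1
  (some x, run', if acc.2.2 < run' then run' else acc.2.2)

def maximizeGreatness2_alt (nums : List Int) : Int :=
  let s := PySem.List.sorted nums (fun x => x) false
  let st := s.foldl pvStepB (none, 0, 0)
  (s.length : Int) - st.2.2

-- ===== PRECONDITION & SPEC =====
def Spec_maximizeGreatness2 (nums : List Int) (out : Int) : Prop := out = maximizeGreatness2_alt nums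
instance (nums : List Int) (out : Int) : Decidable (Spec_maximizeGreatness2 nums out) := by unfold Spec_maximizeGreatness2; infer_instance

-- ===== CLAIM (what is proved, stated in full; the proofs are below) =====
def Claim_equal_maximizeGreatness2 : Prop := ∀ (nums : List Int), Dom_maximizeGreatness2 nums → Spec_maximizeGreatness2 nums (maximizeGreatness2 nums)

-- ===== LEMMAS AND PROOFS =====

-- element access shorthand (proof-side only)
def pvG (s : List Int) (k : Int) : Int := PySem.List.pyGetD s k 0

theorem pvG_mono (s : List Int) (hs : s.Pairwise (· ≤ ·)) {a b : Int}
    (ha : 0 ≤ a) (hab : a ≤ b) (hb : b < (s.length : Int)) : pvG s a ≤ pvG s b := by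
  rcases eq_or_lt_of_le hab with h | h
  · subst h; exact le_refl _
  · have ha' : a < (s.length : Int) := lt_trans h hb
    rw [pvG, pvG, PySem.List.pyGetD_eq_getElem s 0 ha ha', PySem.List.pyGetD_eq_getElem s 0 (by omega) hb]
    exact (List.pairwise_iff_getElem.mp hs) a.toNat b.toNat (by omega) (by omega) (by omega)

-- some value has a run (block of equal entries) of length L in s
def pvAch (s : List Int) (L : Int) : Prop :=
  1 ≤ L ∧ ∃ t : Int, 0 ≤ t ∧ t + L ≤ (s.length : Int) ∧ pvG s t = pvG s (t + L - 1)

-- no value has a run of length L+1 in s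
def pvBnd (s : List Int) (L : Int) : Prop :=
  ∀ k : Int, 0 ≤ k → k + L < (s.length : Int) → pvG s k < pvG s (k + L)

theorem pvChar_lt_false (s : List Int) (hs : s.Pairwise (· ≤ ·)) {L1 L2 : Int}
    (hL1 : 1 ≤ L1) (h2 : pvAch s L2) (b1 : pvBnd s L1) (h12 : L1 < L2) : False := by
  obtain ⟨hL2, t, ht0, htn, hteq⟩ := h2
  have h1 : pvG s t < pvG s (t + L1) := b1 t ht0 (by omega)
  have h2' : pvG s (t + L1) ≤ pvG s (t + L2 - 1) := pvG_mono s hs (by omega) (by omega) (by omega)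
  omega

theorem pvChar_uniq (s : List Int) (hs : s.Pairwise (· ≤ ·)) {L1 L2 : Int}
    (h1 : pvAch s L1) (b1 : pvBnd s L1) (h2 : pvAch s L2) (b2 : pvBnd s L2) : L1 = L2 := by
  rcases lt_trichotomy L1 L2 with h | h | h
  · exact absurd (pvChar_lt_false s hs h1.1 h2 b1 h) (fun f => f)
  · exact h
  · exact absurd (pvChar_lt_false s hs h2.1 h1 b2 h) (fun f => f)

theorem pvInnerA_spec (s : List Int) (i j : Int) (hjn : j ≤ (s.length : Int)) :
    j ≤ pvInnerA s i j ∧ pvInnerA s i j ≤ (s.length : Int) ∧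
    (∀ k, j ≤ k → k < pvInnerA s i j → pvG s k ≤ pvG s i) ∧
    (pvInnerA s i j < (s.length : Int) → pvG s i < pvG s (pvInnerA s i j)) := by
  rw [pvInnerA]
  split
  · rename_i h
    obtain ⟨ih1, ih2, ih3, ih4⟩ := pvInnerA_spec s i (j + 1) (by omega)
    refine ⟨by omega, ih2, ?_, ih4⟩
    intro k hk1 hk2
    rcases eq_or_lt_of_le hk1 with rfl | h'
    · exact h.2
    · exact ih3 k (by omega) hk2
  · rename_i h
    refine ⟨le_refl _, hjn, fun k hk1 hk2 => absurd hk1 (by omega), fun hlt => ?_⟩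
    rw [not_and] at h
    have := h hlt
    simp only [not_le] at this
    exact this
termination_by ((s.length : Int) - j).toNat
decreasing_by omega

theorem pvOuterA_spec (s : List Int) (hs : s.Pairwise (· ≤ ·)) (i j : Int)
    (hi : 0 ≤ i) (hij : i < j) (hjn : j ≤ (s.length : Int))
    (hbnd : ∀ k, 0 ≤ k → k + (j - i) < j → pvG s k < pvG s (k + (j - i)))
    (hach : ∃ t : Int, 0 ≤ t ∧ t + (j - i) ≤ j ∧ pvG s t = pvG s (t + (j - i) - 1))
    (hlink : 0 < i → pvG s (i - 1) < pvG s (j - 1)) :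
    ∃ L, pvAch s L ∧ pvBnd s L ∧ pvOuterA s i i j = (s.length : Int) - L := by
  have hstep : pvOuterA s i i j =
      if j < (s.length : Int) then
        pvOuterA s (if pvInnerA s i j < (s.length : Int) then i + 1 else i) (i + 1)
          (pvInnerA s i j + 1)
      else i := by
    rw [pvOuterA]; split <;> rfl
  by_cases hjlt : j < (s.length : Int)
  · -- the outer loop runs one more iteration
    rw [hstep, if_pos hjlt]
    obtain ⟨hj'1, hj'2, hj'3, hj'4⟩ := pvInnerA_spec s i j (le_of_lt hjlt)
    set j' := pvInnerA s i j with hj'def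
    -- elements skipped by the inner loop all equal nums[i]
    have hblock : j < j' → ∀ m : Int, i ≤ m → m < j' → pvG s m = pvG s i := by
      intro hjj' m hm1 hm2
      have h1 : pvG s i ≤ pvG s m := pvG_mono s hs hi hm1 (by omega)
      have h2 : pvG s m ≤ pvG s i := by
        by_cases hmj : j ≤ m
        · exact hj'3 m hmj hm2
        · have ha : pvG s m ≤ pvG s (j' - 1) := pvG_mono s hs (by omega) (by omega) (by omega)
          exact le_trans ha (hj'3 (j' - 1) (by omega) (by omega))
      omega
    -- a shorter element is beaten by anything at or beyond position k + (j - i)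
    have key : ∀ k m : Int, 0 ≤ k → k < i → k + (j - i) ≤ m → m < (s.length : Int) →
        pvG s k < pvG s m := by
      intro k m hk0 hki hkm hmn
      by_cases hmj : m < j
      · have h1 : pvG s k < pvG s (k + (j - i)) := hbnd k hk0 (by omega)
        have h2 : pvG s (k + (j - i)) ≤ pvG s m := pvG_mono s hs (by omega) hkm hmn
        omega
      · have h1 : pvG s k ≤ pvG s (i - 1) := pvG_mono s hs hk0 (by omega) (by omega)
        have h2 := hlink (by omega)
        have h3 : pvG s (j - 1) ≤ pvG s m := pvG_mono s hs (by omega) (by omega) hmn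
        omega
    by_cases hlt2 : j' < (s.length : Int)
    · -- a partner was found: recurse with the invariant re-established
      rw [if_pos hlt2]
      obtain ⟨L, hA, hB, hres⟩ := pvOuterA_spec s hs (i + 1) (j' + 1) (by omega) (by omega)
        (by omega)
        (by
          intro k hk0 hkm
          have hki : k ≤ i := by omega
          rcases eq_or_lt_of_le hki with rfl | hklt
          · have he : k + (j' + 1 - (k + 1)) = j' := by omega
            rw [he]; exact hj'4 hlt2
          · have he : k + (j' + 1 - (i + 1)) = k + (j' - i) := by omega
            rw [he]
            exact key k (k + (j' - i)) hk0 hklt (by omega) (by omega))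
        (by
          by_cases hjj' : j < j'
          · refine ⟨i, hi, by omega, ?_⟩
            have he : i + (j' + 1 - (i + 1)) - 1 = j' - 1 := by omega
            rw [he]
            exact (hblock hjj' (j' - 1) (by omega) (by omega)).symm
          · obtain ⟨t, ht0, htj, hteq⟩ := hach
            have hjj : j' = j := by omega
            refine ⟨t, ht0, by omega, ?_⟩
            have he : t + (j' + 1 - (i + 1)) - 1 = t + (j - i) - 1 := by omega
            rw [he]; exact hteq)
        (by
          intro _
          have he1 : i + 1 - 1 = i := by omega
          have he2 : j' + 1 - 1 = j' := by omega
          rw [he1, he2]; exact hj'4 hlt2)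
      exact ⟨L, hA, hB, hres⟩
    · -- the inner loop ran off the end: the tail nums[i..n-1] is one equal block
      rw [if_neg hlt2]
      have hj'n : j' = (s.length : Int) := by omega
      have hdone : pvOuterA s i (i + 1) (j' + 1) = i := by
        rw [pvOuterA, dif_neg (by omega)]
      rw [hdone]
      have htail : pvG s ((s.length : Int) - 1) = pvG s i := by
        refine hblock (by omega) ((s.length : Int) - 1) (by omega) (by omega)
      refine ⟨(s.length : Int) - i, ⟨by omega, i, hi, by omega, ?_⟩, ?_, by omega⟩
      · have he : i + ((s.length : Int) - i) - 1 = (s.length : Int) - 1 := by omega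
        rw [he]; exact htail.symm
      · intro k hk0 hkm
        exact key k (k + ((s.length : Int) - i)) hk0 (by omega) (by omega) (by omega)
  · -- the loop is over: j = n and every element 0..i-1 was matched
    rw [hstep, if_neg hjlt]
    obtain ⟨t, ht0, htj, hteq⟩ := hach
    refine ⟨j - i, ⟨by omega, t, ht0, by omega, hteq⟩, ?_, by omega⟩
    intro k hk0 hkm
    exact hbnd k hk0 (by omega)
termination_by ((s.length : Int) - j).toNat
decreasing_by omega

theorem pvFoldB_spec (l : List Int) (hl : l ≠ []) (hs : l.Pairwise (· ≤ ·)) :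
    ∃ r m, l.foldl pvStepB (none, 0, 0) = (some (pvG l ((l.length : Int) - 1)), r, m) ∧
      1 ≤ r ∧ r ≤ (l.length : Int) ∧
      pvG l ((l.length : Int) - r) = pvG l ((l.length : Int) - 1) ∧
      (r < (l.length : Int) → pvG l ((l.length : Int) - r - 1) < pvG l ((l.length : Int) - r)) ∧
      pvAch l m ∧ pvBnd l m := by
  induction l using List.reverseRecOn with
  | nil => exact absurd rfl hl
  | append_singleton u x ih =>
    have hlen : (((u ++ [x]).length : Nat) : Int) = (u.length : Int) + 1 := by
      simp
    have hGlast : pvG (u ++ [x]) (u.length : Int) = x := by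
      rw [pvG, PySem.List.pyGetD_eq_getElem _ 0 (by positivity) (by rw [hlen]; omega)]
      simp
    have hGpre : ∀ k : Int, 0 ≤ k → k < (u.length : Int) → pvG (u ++ [x]) k = pvG u k := by
      intro k hk0 hk1
      rw [pvG, pvG, PySem.List.pyGetD_eq_getElem _ 0 hk0 (by rw [hlen]; omega),
        PySem.List.pyGetD_eq_getElem u 0 hk0 hk1]
      rw [List.getElem_append_left (by omega)]
    rcases List.eq_nil_or_concat' u with rfl | ⟨_, _, _⟩
    · -- singleton list: the scan starts its first run
      simp only [List.nil_append]
      refine ⟨1, 1, ?_, by omega, by norm_num, by norm_num, ?_, ⟨by omega, 0, by omega, by norm_num, by norm_num⟩, ?_⟩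
      · norm_num [pvG, pvStepB, PySem.List.pyGetD_zero_cons]
      · intro h; norm_num at h
      · intro k hk0 hk1; norm_num at hk1; omega
    · -- u nonempty: one fold step on top of the invariant for u
      rename_i hu'
      have hu : u ≠ [] := by rintro rfl; simp at hu'
      have hnu1 : 1 ≤ (u.length : Int) := by
        have := List.length_pos_of_ne_nil hu; omega
      obtain ⟨hsu, -, hux⟩ := List.pairwise_append.mp hs
      have hux' : ∀ a ∈ u, a ≤ x := fun a ha => hux a ha x (by simp)
      obtain ⟨r, m, hfold, hr1, hrle, hrend, hrbound, ⟨hm1, t, ht0, htn, hteq⟩, hmbnd⟩ :=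
        ih hu hsu
      have hfoldl : (u ++ [x]).foldl pvStepB (none, 0, 0) =
          pvStepB (some (pvG u ((u.length : Int) - 1)), r, m) x := by
        rw [List.foldl_append, hfold]
        rfl
      have hmem : pvG u ((u.length : Int) - 1) ∈ u := by
        rw [pvG, PySem.List.pyGetD_eq_getElem u 0 (by omega) (by omega)]
        exact List.getElem_mem _
      by_cases hx : pvG u ((u.length : Int) - 1) = x
      · -- the new element extends the final run
        have hres : (u ++ [x]).foldl pvStepB (none, 0, 0) =
            (some x, r + 1, if m < r + 1 then r + 1 else m) := by
          rw [hfoldl, pvStepB]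
          simp [hx]
        set m' := if m < r + 1 then r + 1 else m with hm'def
        have hm'1 : m ≤ m' := by rw [hm'def]; split <;> omega
        have hm'2 : r + 1 ≤ m' := by rw [hm'def]; split <;> omega
        have hend : pvG (u ++ [x]) ((u.length : Int) - r) = x := by
          rw [hGpre _ (by omega) (by omega), hrend, hx]
        refine ⟨r + 1, m', ?_, by omega, by rw [hlen]; omega, ?_, ?_, ?_, ?_⟩
        · rw [hres, hlen]
          have he : (u.length : Int) + 1 - 1 = (u.length : Int) := by omega
          rw [he, hGlast]
        · rw [hlen]
          have he1 : (u.length : Int) + 1 - (r + 1) = (u.length : Int) - r := by omega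
          have he2 : (u.length : Int) + 1 - 1 = (u.length : Int) := by omega
          rw [he1, he2, hend, hGlast]
        · rw [hlen]
          intro hrn
          have he1 : (u.length : Int) + 1 - (r + 1) - 1 = (u.length : Int) - r - 1 := by omega
          have he2 : (u.length : Int) + 1 - (r + 1) = (u.length : Int) - r := by omega
          rw [he1, he2, hGpre _ (by omega) (by omega), hGpre _ (by omega) (by omega)]
          exact hrbound (by omega)
        · -- the maximum run is achieved in u ++ [x]
          by_cases hcase : r + 1 ≤ m
          · have hm'm : m' = m := by rw [hm'def]; split <;> omega
            refine ⟨by omega, t, ht0, by rw [hlen]; omega, ?_⟩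
            rw [hm'm, hGpre _ ht0 (by omega), hGpre _ (by omega) (by omega)]
            exact hteq
          · have hm'm : m' = r + 1 := by rw [hm'def]; split <;> omega
            refine ⟨by omega, (u.length : Int) - r, by omega, by rw [hlen]; omega, ?_⟩
            rw [hm'm]
            have he : (u.length : Int) - r + (r + 1) - 1 = (u.length : Int) := by omega
            rw [he, hend, hGlast]
        · -- and no longer run exists
          intro k hk0 hkm
          rw [hlen] at hkm
          by_cases hke : k + m' = (u.length : Int)
          · have hgk : pvG (u ++ [x]) k = pvG u k := hGpre k hk0 (by omega)
            have h1 : pvG u k ≤ pvG u ((u.length : Int) - r - 1) :=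
              pvG_mono u hsu hk0 (by omega) (by omega)
            have h2 : pvG u ((u.length : Int) - r - 1) < pvG u ((u.length : Int) - r) :=
              hrbound (by omega)
            have h3 : pvG u ((u.length : Int) - r) ≤ pvG u ((u.length : Int) - 1) :=
              pvG_mono u hsu (by omega) (by omega) (by omega)
            rw [hgk, hke, hGlast]
            omega
          · have hgk : pvG (u ++ [x]) k = pvG u k := hGpre k hk0 (by omega)
            have hgm : pvG (u ++ [x]) (k + m') = pvG u (k + m') := hGpre _ (by omega) (by omega)
            have h1 : pvG u k < pvG u (k + m) := hmbnd k hk0 (by omega)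
            have h2 : pvG u (k + m) ≤ pvG u (k + m') := pvG_mono u hsu (by omega) (by omega) (by omega)
            rw [hgk, hgm]
            omega
      · -- the new element starts a fresh run of length 1
        have hlt : pvG u ((u.length : Int) - 1) < x :=
          lt_of_le_of_ne (hux' _ hmem) hx
        have hres : (u ++ [x]).foldl pvStepB (none, 0, 0) = (some x, 1, m) := by
          rw [hfoldl, pvStepB]
          simp [hx, show ¬ m < 1 by omega]
        refine ⟨1, m, ?_, by omega, by rw [hlen]; omega, ?_, ?_, ?_, ?_⟩
        · rw [hres, hlen]
          have he : (u.length : Int) + 1 - 1 = (u.length : Int) := by omega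
          rw [he, hGlast]
        · rw [hlen]
        · rw [hlen]
          intro _
          have he1 : (u.length : Int) + 1 - 1 - 1 = (u.length : Int) - 1 := by omega
          have he2 : (u.length : Int) + 1 - 1 = (u.length : Int) := by omega
          rw [he1, he2, hGpre _ (by omega) (by omega), hGlast]
          exact hlt
        · refine ⟨hm1, t, ht0, by rw [hlen]; omega, ?_⟩
          rw [hGpre _ ht0 (by omega), hGpre _ (by omega) (by omega)]
          exact hteq
        · intro k hk0 hkm
          rw [hlen] at hkm
          by_cases hke : k + m = (u.length : Int)
          · have hgk : pvG (u ++ [x]) k = pvG u k := hGpre k hk0 (by omega)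
            have h1 : pvG u k ≤ pvG u ((u.length : Int) - 1) :=
              pvG_mono u hsu hk0 (by omega) (by omega)
            rw [hgk, hke, hGlast]
            omega
          · have hgk : pvG (u ++ [x]) k = pvG u k := hGpre k hk0 (by omega)
            have hgm : pvG (u ++ [x]) (k + m) = pvG u (k + m) := hGpre _ (by omega) (by omega)
            rw [hgk, hgm]
            exact hmbnd k hk0 (by omega)

-- ===== VERDICT (by name: the statement is the Claim_ definition above) =====
theorem maximizeGreatness2_spec : Claim_equal_maximizeGreatness2 := by
  intro nums _
  unfold Spec_maximizeGreatness2 maximizeGreatness2 maximizeGreatness2_alt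
  by_cases hnil : nums = []
  · subst hnil
    show pvOuterA (PySem.List.sorted [] (fun x => x) false) 0 0 1 =
      ((PySem.List.sorted ([] : List Int) (fun x => x) false).length : Int) -
      (List.foldl pvStepB (none, 0, 0) (PySem.List.sorted ([] : List Int) (fun x => x) false)).2.2
    rw [show PySem.List.sorted ([] : List Int) (fun x => x) false = [] from rfl]
    rw [pvOuterA, dif_neg (by decide)]
    decide
  · set s := PySem.List.sorted nums (fun x => x) false with hsdef
    have hsne : s ≠ [] := by
      simp [hsdef, PySem.List.sorted_eq_nil_iff, hnil]
    have hs : s.Pairwise (· ≤ ·) := PySem.List.sorted_pairwise nums (fun x => x)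
    have hn1 : 1 ≤ (s.length : Int) := by
      have := List.length_pos_of_ne_nil hsne; omega
    obtain ⟨L, achA, bndA, hA⟩ := pvOuterA_spec s hs 0 1 (le_refl _) (by omega) hn1
      (fun k hk1 hk2 => by omega)
      ⟨0, le_refl _, by omega, by norm_num⟩
      (fun h => absurd h (by omega))
    obtain ⟨r, m, hfold, _, _, _, _, achB, bndB⟩ := pvFoldB_spec s hsne hs
    have hLm : L = m := pvChar_uniq s hs achA bndA achB bndB
    simp only [hfold]
    rw [hA, hLm]
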